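-- pv_equiv track=rewrite | github.com/pypi-data/pypi-mirror-83 | packages/python-siren/python-siren-6.0.5.tar.gz/python-siren-6.0.5/siren/clired/prepare_polygons.py | decomplex_poly
-- ===== SOURCE A (Python) =====
-- def decomplex_poly(poly):
--     ### break up loops in polygon to separate polygons
--     copy_poly = list(poly)
--     i = 1
--     subpolys = []
--     while i < len(poly):
--         if poly[i] in poly[:i]:
--             j = poly[:i].index(poly[i])
--             tmp_poly = []
--             for k in range(i, j, -1):
--                 tmp_poly.append(poly.pop(k))
--             subpolys.append([poly[j]]+tmp_poly[::-1])
--             i = j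
--         else:
--             i += 1
--     if len(poly) > 1:
--         subpolys.append(poly)
--     return subpolys
-- ===== SOURCE B (Python) =====
-- def decomplex_poly(poly):
--     ### break up loops in polygon to separate polygons
--     # one pass with a value->stack-index dict; O(n) amortized.
--     # NOTE: unlike A, this does not mutate `poly` in place; return value is identical.
--     subpolys = []
--     stack = []
--     pos = {}
--     for v in poly:
--         if v in pos:
--             j = pos[v]
--             subpolys.append(stack[j:] + [v])
--             for w in stack[j + 1:]:
--                 del pos[w]
--             del stack[j + 1:]
--         else:
--             pos[v] = len(stack)
--             stack.append(v)
--     if len(stack) > 1: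
--         subpolys.append(stack)
--     return subpolys
-- ===== Notes on version B (the rewrite author's own statement) =====
-- stated objective: faster
-- what changed: Replaces A's repeated prefix scans (`poly[i] in poly[:i]`, `.index`) and in-place pops with a single pass that maintains a value-to-stack-index dict and a stack, emitting a loop sub-polygon on each repeated vertex in amortized O(1); B does not mutate the input list.
import Mathlib
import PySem

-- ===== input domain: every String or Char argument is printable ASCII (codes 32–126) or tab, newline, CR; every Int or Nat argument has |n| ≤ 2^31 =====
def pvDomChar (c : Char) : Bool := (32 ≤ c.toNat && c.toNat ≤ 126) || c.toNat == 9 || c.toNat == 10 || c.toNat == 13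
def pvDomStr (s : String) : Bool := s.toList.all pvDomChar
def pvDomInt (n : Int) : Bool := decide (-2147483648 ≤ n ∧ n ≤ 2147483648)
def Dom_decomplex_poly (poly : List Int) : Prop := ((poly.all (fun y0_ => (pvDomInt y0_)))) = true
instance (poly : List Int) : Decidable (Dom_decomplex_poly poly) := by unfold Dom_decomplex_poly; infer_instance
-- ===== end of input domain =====

-- B replaces A's quadratic prefix scans (`in poly[:i]` / `.index`) by a value→stack-index dict
-- maintained in one pass. A mutates `poly` in place (pops); B does not —
-- the equivalence proved here is about the RETURN value only.

-- ===== PORT A =====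
-- one step of the inner `for k in range(i, j, -1): tmp_poly.append(poly.pop(k))`;
-- the `none` arm only makes the function total (in A the popped index is always in range).
def pvPopStep (st : List Int × List Int) (k : Int) : List Int × List Int :=
  match PySem.List.pop? st.1 k with
  | some (x, l) => (l, st.2 ++ [x])
  | none => st

-- A's while-loop, ported with a fuel parameter (standard while→fuel; the fuel passed by
-- decomplex_poly always exceeds the loop's step count, see pvMain below); `i` stays a
-- nonnegative index in A (starts at 1, becomes j ≥ 0 or i+1), so it is carried as a Nat;
-- `poly[:i]` is `poly.take i` and `poly[i]` is in range by the guard;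
-- `poly[:i].index(poly[i])` is `List.idxOf` (membership was just checked, so `.index` cannot raise).
def pvLoopA : Nat → List Int → Nat → List (List Int) → List (List Int)
  | 0, _, _, subpolys => subpolys
  | fuel+1, poly, i, subpolys =>
    if h : i < poly.length then
      if hmem : poly[i] ∈ poly.take i then
        let j := (poly.take i).idxOf poly[i]
        let st := (PySem.List.pyRange (i : Int) (j : Int) (-1)).foldl pvPopStep (poly, [])
        pvLoopA fuel st.1 j (subpolys ++ [PySem.List.pyGetD st.1 (j : Int) 0 :: st.2.reverse])
      else
        pvLoopA fuel poly (i+1) subpolys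
    else
      if poly.length > 1 then subpolys ++ [poly] else subpolys

def decomplex_poly (poly : List Int) : List (List Int) :=
  -- copy_poly is unused by A; i starts at 1, subpolys at []
  pvLoopA (2 * poly.length + 1) poly 1 []

-- ===== PORT B =====
-- `for w in stack[j+1:]: del pos[w]`
def pvEraseKeys (pos : PySem.Dict Int Int) (ws : List Int) : PySem.Dict Int Int :=
  ws.foldl (fun d w => d.erase w) pos

-- B's single for-loop over the vertices, state (stack, pos, subpolys);
-- `v in pos` / `pos[v]` is the match on `pos.get? v`; the index j stored by B is always ≥ 0
def pvLoopB : List Int → List Int → PySem.Dict Int Int → List (List Int) → List (List Int)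
  | [], stack, _, subpolys => if stack.length > 1 then subpolys ++ [stack] else subpolys
  | v :: rest, stack, pos, subpolys =>
    match pos.get? v with
    | some j =>
      let jn := j.toNat
      pvLoopB rest (stack.take (jn+1)) (pvEraseKeys pos (stack.drop (jn+1)))
        (subpolys ++ [stack.drop jn ++ [v]])
    | none =>
      pvLoopB rest (stack ++ [v]) (pos.insert v (stack.length : Int)) subpolys

def decomplex_poly_alt (poly : List Int) : List (List Int) :=
  pvLoopB poly [] PySem.Dict.empty []

-- ===== PRECONDITION & SPEC =====
def Spec_decomplex_poly (poly : List Int) (out : List (List Int)) : Prop := out = decomplex_poly_alt poly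
instance (poly : List Int) (out : List (List Int)) : Decidable (Spec_decomplex_poly poly out) := by unfold Spec_decomplex_poly; infer_instance

-- ===== CLAIM (what is proved, stated in full; the proofs are below) =====
def Claim_equal_decomplex_poly : Prop := ∀ (poly : List Int), Dom_decomplex_poly poly → Spec_decomplex_poly poly (decomplex_poly poly)

-- ===== LEMMAS AND PROOFS =====

-- the invariant tying B's dict to B's stack: pos maps exactly the stack's values to their indices
def pvInv (stack : List Int) (pos : PySem.Dict Int Int) : Prop :=
  stack.Nodup ∧ ∀ v : Int, pos.get? v = (PySem.List.index? stack v).map (fun n => (n : Int))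

theorem pv_idxOf?_of_mem (l : List Int) (v : Int) (h : v ∈ l) :
    List.idxOf? v l = some (l.idxOf v) := by
  induction l with
  | nil => cases h
  | cons a t ih =>
    by_cases hv : a = v
    · simp [List.idxOf?_cons, hv]
    · have hm : v ∈ t := by
        rcases List.mem_cons.1 h with h' | h'
        · exact absurd h'.symm hv
        · exact h'
      simp [List.idxOf?_cons, hv, ih hm]

theorem pv_get?_erase (d : PySem.Dict Int Int) (k k' : Int) :
    (d.erase k).get? k' = if k' = k then none else d.get? k' := by
  obtain ⟨items⟩ := d
  simp only [PySem.Dict.erase, PySem.Dict.get?]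
  induction items with
  | nil => simp
  | cons a t ih =>
    by_cases hak : a.1 = k
    · rw [List.filter_cons_of_neg (by simp [hak])]
      rw [ih]
      by_cases hk : k' = k
      · simp [hk]
      · rw [if_neg hk, List.find?_cons_of_neg (by simp; rintro rfl; exact hk (by rw [hak]))]
        rw [if_neg hk]
    · rw [List.filter_cons_of_pos (by simp [hak])]
      by_cases hak' : a.1 = k'
      · have hk : ¬ k' = k := by rintro rfl; exact hak hak'
        rw [List.find?_cons_of_pos (by simp [hak']), List.find?_cons_of_pos (by simp [hak']), if_neg hk]
      · rw [List.find?_cons_of_neg (by simp [hak']), List.find?_cons_of_neg (by simp [hak'])]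
        exact ih

theorem pv_get?_eraseKeys (ws : List Int) : ∀ (d : PySem.Dict Int Int) (v : Int),
    (pvEraseKeys d ws).get? v = if v ∈ ws then none else d.get? v := by
  induction ws with
  | nil => intro d v; simp [pvEraseKeys]
  | cons w t ih =>
    intro d v
    simp only [pvEraseKeys, List.foldl_cons]
    rw [show List.foldl (fun d w => PySem.Dict.erase d w) (d.erase w) t = pvEraseKeys (d.erase w) t from rfl]
    rw [ih, pv_get?_erase]
    by_cases h1 : v ∈ t
    · simp [h1]
    · by_cases h2 : v = w <;> simp [h1, h2]

-- characterisation of the inner pop-loop of A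
theorem pvPopFold_spec (d : Nat) : ∀ (poly : List Int) (i j : Nat) (acc : List Int),
    i - j = d → j ≤ i → i < poly.length →
    (PySem.List.pyRange (i : Int) (j : Int) (-1)).foldl pvPopStep (poly, acc)
      = (poly.take (j+1) ++ poly.drop (i+1), acc ++ ((poly.drop (j+1)).take (i-j)).reverse) := by
  induction d with
  | zero =>
    intro poly i j acc hd hj hi
    have hij : i = j := by omega
    subst hij
    rw [PySem.List.pyRange_neg_one_eq_nil (le_refl _)]
    simp [List.take_append_drop]
  | succ d ih =>
    intro poly i j acc hd hj hi
    have hji : j < i := by omega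
    rw [PySem.List.pyRange_neg_one_cons (by exact_mod_cast hji)]
    have hcast : (i : Int) - 1 = ((i - 1 : Nat) : Int) := by omega
    rw [List.foldl_cons, hcast]
    have hstep : pvPopStep (poly, acc) (i : Int) = (poly.eraseIdx i, acc ++ [poly[i]]) := by
      simp [pvPopStep, PySem.List.pop?_natCast poly i hi]
    rw [hstep]
    have hlen : (poly.eraseIdx i).length = poly.length - 1 := by
      rw [List.length_eraseIdx_of_lt hi]
    rw [ih (poly.eraseIdx i) (i-1) j (acc ++ [poly[i]]) (by omega) (by omega) (by omega)]
    rw [List.eraseIdx_eq_take_drop_succ]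
    have hlt : (List.take i poly).length = i := List.length_take_of_le hi.le
    have e1 : List.take (j+1) (List.take i poly ++ List.drop (i+1) poly) = List.take (j+1) poly := by
      rw [List.take_append_of_le_length (by omega), List.take_take]
      congr 1; omega
    have e2 : List.drop (i-1+1) (List.take i poly ++ List.drop (i+1) poly) = List.drop (i+1) poly := by
      have hii : i - 1 + 1 = i := by omega
      rw [hii, List.drop_append, hlt]
      simp
    have e3 : List.drop (j+1) (List.take i poly ++ List.drop (i+1) poly)
        = List.take (i-1-j) (List.drop (j+1) poly) ++ List.drop (i+1) poly := by
      rw [List.drop_append, hlt, List.drop_take]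
      have hz : j + 1 - i = 0 := by omega
      rw [hz, List.drop_zero]
      congr 2
      omega
    have e4 : List.take (i-1-j) (List.take (i-1-j) (List.drop (j+1) poly) ++ List.drop (i+1) poly)
        = List.take (i-1-j) (List.drop (j+1) poly) := by
      rw [List.take_append_of_le_length, List.take_take, min_self]
      rw [List.length_take, List.length_drop]
      omega
    have e5 : List.take (i-j) (List.drop (j+1) poly) = List.take (i-1-j) (List.drop (j+1) poly) ++ [poly[i]] := by
      have hij : i - j = (i-1-j)+1 := by omega
      rw [hij, List.take_add_one]
      congr 1
      rw [List.getElem?_drop]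
      have hidx : j+1+(i-1-j) = i := by omega
      rw [hidx, List.getElem?_eq_getElem hi]
      rfl
    rw [e1, e2, e3, e4, e5]
    simp

-- the core simulation: A's loop at index i equals B's loop on the remaining vertices,
-- with B's stack being A's processed prefix poly[:i]
theorem pvMain : ∀ (fuel : Nat) (poly : List Int) (i : Nat) (subs : List (List Int))
    (pos : PySem.Dict Int Int), 2 * poly.length - i < fuel → pvInv (poly.take i) pos →
    pvLoopA fuel poly i subs = pvLoopB (poly.drop i) (poly.take i) pos subs := by
  intro fuel
  induction fuel using Nat.strong_induction_on with
  | _ fuel ih =>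
    intro poly i subs pos hN hInv
    obtain ⟨hnd, hpos⟩ := hInv
    obtain ⟨N, rfl⟩ : ∃ M, fuel = M + 1 := ⟨fuel - 1, by omega⟩
    by_cases h : i < poly.length
    · have hdropi : poly.drop i = poly[i] :: poly.drop (i+1) := (List.getElem_cons_drop h).symm
      by_cases hmem : poly[i] ∈ poly.take i
      · -- repeated vertex: close a loop
        have hlenS : (poly.take i).length = i := List.length_take_of_le h.le
        set j := (poly.take i).idxOf poly[i] with hjdef
        have hj : j < i := by
          have := List.idxOf_lt_length_of_mem hmem
          rwa [hlenS] at this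
        obtain ⟨M, rfl⟩ : ∃ M, N = M + 1 := ⟨N - 1, by omega⟩
        have hidx? : List.idxOf? poly[i] (poly.take i) = some j := pv_idxOf?_of_mem _ _ hmem
        obtain ⟨hjlt, hSj, hminlt⟩ := List.idxOf?_eq_some_iff.1 hidx?
        have hpj : poly[j]'(by omega) = poly[i] := by simpa [List.getElem_take] using hSj
        have hvnotin : poly[i] ∉ poly.take j := by
          intro hc
          obtain ⟨t, ht, hte⟩ := List.mem_iff_getElem.1 hc
          have ht2 : t < j := by rw [List.length_take] at ht; omega
          refine hminlt t ht2 ?_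
          have hte2 : poly[t]'(by omega) = poly[i] := by simpa [List.getElem_take] using hte
          simpa [List.getElem_take] using hte2
        -- unfold A's loop body and evaluate the pop-loop
        rw [pvLoopA]
        simp only [dif_pos h, dif_pos hmem, ← hjdef]
        rw [pvPopFold_spec (i - j) poly i j [] rfl hj.le h]
        simp only [List.reverse_reverse, List.nil_append]
        have hP2j : PySem.List.pyGetD (poly.take (j+1) ++ poly.drop (i+1)) (j : Int) 0 = poly[i] := by
          rw [PySem.List.pyGetD_natCast, List.getD_eq_getElem?_getD,
            List.getElem?_append_left (by rw [List.length_take]; omega)]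
          rw [List.getElem?_take_of_lt (by omega), List.getElem?_eq_getElem (show j < poly.length by omega)]
          simp [hpj]
        rw [hP2j]
        -- one more A-iteration at index j finds nothing new
        have hc1 : j < (poly.take (j+1) ++ poly.drop (i+1)).length := by
          rw [List.length_append, List.length_take, List.length_drop]; omega
        have hP2getj : (poly.take (j+1) ++ poly.drop (i+1))[j]'hc1 = poly[i] := by
          rw [List.getElem_append_left (by rw [List.length_take]; omega)]
          simpa [List.getElem_take] using hpj
        have hP2takej : (poly.take (j+1) ++ poly.drop (i+1)).take j = poly.take j := by
          rw [List.take_append_of_le_length (by rw [List.length_take]; omega), List.take_take]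
          congr 1; omega
        rw [pvLoopA]
        rw [dif_pos hc1]
        rw [dif_neg (show ¬ ((poly.take (j+1) ++ poly.drop (i+1))[j]'hc1 ∈ (poly.take (j+1) ++ poly.drop (i+1)).take j) by
          rw [hP2takej]
          simp only [hP2getj]
          exact hvnotin)]
        have hP2take : (poly.take (j+1) ++ poly.drop (i+1)).take (j+1) = poly.take (j+1) := by
          rw [List.take_append_of_le_length (by rw [List.length_take]; omega), List.take_take, min_self]
        have hP2drop : (poly.take (j+1) ++ poly.drop (i+1)).drop (j+1) = poly.drop (i+1) := by
          rw [List.drop_append, List.length_take_of_le (by omega)]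
          simp
        have hStake : (poly.take i).take (j+1) = poly.take (j+1) := by
          rw [List.take_take]; congr 1; omega
        have hsplit : poly.take i = poly.take (j+1) ++ (poly.take i).drop (j+1) := by
          conv_lhs => rw [← List.take_append_drop (j+1) (poly.take i)]
          rw [hStake]
        -- invariant for the shrunk stack and dict
        have hInv' : pvInv (poly.take (j+1)) (pvEraseKeys pos ((poly.take i).drop (j+1))) := by
          constructor
          · have := (List.take_sublist (j+1) (poly.take i)).nodup hnd
            rwa [hStake] at this
          · intro w
            rw [pv_get?_eraseKeys, hpos]
            by_cases hwM : w ∈ (poly.take i).drop (j+1)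
            · rw [if_pos hwM]
              have hdisj : w ∉ poly.take (j+1) := by
                intro hcT
                have hnd2 := hnd
                rw [hsplit] at hnd2
                exact (List.disjoint_of_nodup_append hnd2) hcT hwM
              rw [(PySem.List.index?_eq_none_iff _ _).2 hdisj]; rfl
            · rw [if_neg hwM]
              by_cases hwT : w ∈ poly.take (j+1)
              · conv_lhs => rw [hsplit]
                rw [PySem.List.index?_append_of_mem _ hwT]
              · have hwS : w ∉ poly.take i := by rw [hsplit]; simp [hwT, hwM]
                rw [(PySem.List.index?_eq_none_iff _ _).2 hwS, (PySem.List.index?_eq_none_iff _ _).2 hwT]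
        have hmeas : 2 * (poly.take (j+1) ++ poly.drop (i+1)).length - (j+1) < M := by
          rw [List.length_append, List.length_take, List.length_drop]
          omega
        have hih := ih M (by omega) (poly.take (j+1) ++ poly.drop (i+1)) (j+1) (subs ++ [poly[i] :: List.take (i-j) (poly.drop (j+1))]) (pvEraseKeys pos ((poly.take i).drop (j+1))) hmeas (by rw [hP2take]; exact hInv')
        rw [hP2take, hP2drop] at hih
        rw [hih]
        -- B's step
        rw [hdropi, pvLoopB]
        have hsome : pos.get? poly[i] = some (j : Int) := by
          rw [hpos, PySem.List.index?_eq_idxOf?, hidx?]; rfl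
        rw [hsome]
        simp only [Int.toNat_natCast]
        rw [hStake]
        -- the emitted sub-polygon agrees
        have hseg : (poly.take i).drop j ++ [poly[i]] = poly[i] :: List.take (i-j) (poly.drop (j+1)) := by
          have h1 : poly.drop j = poly[j]'(by omega) :: poly.drop (j+1) := (List.getElem_cons_drop (by omega)).symm
          rw [List.drop_take, h1]
          have h2 : i - j = (i - j - 1) + 1 := by omega
          rw [h2, List.take_succ_cons]
          have h3 : List.take ((i-j-1)+1) (poly.drop (j+1)) = List.take (i-j-1) (poly.drop (j+1)) ++ [poly[i]] := by
            rw [List.take_add_one, List.getElem?_drop]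
            have hx : j+1+(i-j-1) = i := by omega
            rw [hx, List.getElem?_eq_getElem h]; rfl
          rw [hpj, ← h2, h2, h3]
          simp
        rw [hseg]
      · -- fresh vertex: push
        rw [pvLoopA, dif_pos h, dif_neg hmem, hdropi, pvLoopB]
        have hnone : pos.get? poly[i] = none := by
          rw [hpos, (PySem.List.index?_eq_none_iff _ _).2 hmem]; rfl
        rw [hnone]
        have htake : poly.take i ++ [poly[i]] = poly.take (i+1) := by
          rw [List.take_add_one, List.getElem?_eq_getElem h]; rfl
        have hlenS : (poly.take i).length = i := List.length_take_of_le h.le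
        have hInv' : pvInv (poly.take (i+1)) (pos.insert poly[i] ((poly.take i).length : Int)) := by
          constructor
          · rw [← htake, List.nodup_append]
            refine ⟨hnd, List.nodup_singleton _, fun a ha b hb => ?_⟩
            rw [List.mem_singleton] at hb
            subst hb
            exact fun he => hmem (he ▸ ha)
          · intro w
            rw [PySem.Dict.get?_insert, ← htake]
            by_cases hw : w = poly[i]
            · subst hw
              rw [if_pos rfl, PySem.List.index?_append_singleton_self _ _ hmem]
              rfl
            · rw [if_neg hw, hpos]
              by_cases hwS : w ∈ poly.take i
              · rw [PySem.List.index?_append_of_mem _ hwS]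
              · rw [(PySem.List.index?_eq_none_iff _ _).2 hwS,
                  (PySem.List.index?_eq_none_iff _ _).2 (by
                    rw [List.mem_append]
                    rintro (hc | hc)
                    · exact hwS hc
                    · rw [List.mem_singleton] at hc
                      exact hw hc)]
        rw [htake, ih N (by omega) poly (i+1) subs _ (by omega) hInv']
    · -- loop exit
      rw [pvLoopA, dif_neg h]
      rw [List.drop_of_length_le (by omega), List.take_of_length_le (by omega)]
      rfl

-- ===== VERDICT (by name: the statement is the Claim_ definition above) =====
theorem decomplex_poly_spec : Claim_equal_decomplex_poly := by
  intro poly _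
  show decomplex_poly poly = decomplex_poly_alt poly
  unfold decomplex_poly decomplex_poly_alt
  cases poly with
  | nil => rw [pvLoopA]; rfl
  | cons v rest =>
    have hrw : pvLoopB (v :: rest) [] PySem.Dict.empty []
        = pvLoopB rest [v] (PySem.Dict.empty.insert v 0) [] := rfl
    have hInv0 : pvInv ((v :: rest).take 1) (PySem.Dict.empty.insert v 0) := by
      refine ⟨by simp, ?_⟩
      intro w
      rw [PySem.Dict.get?_insert]
      by_cases hw : w = v
      · rw [if_pos hw, show (v :: rest).take 1 = [v] from rfl, hw, PySem.List.index?_cons_self]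
        rfl
      · rw [if_neg hw, PySem.Dict.get?_empty, show (v :: rest).take 1 = [v] from rfl,
          PySem.List.index?_cons_of_ne _ (fun hh => hw hh.symm)]
        rfl
    rw [hrw, pvMain (2 * (v :: rest).length + 1) (v :: rest) 1 [] (PySem.Dict.empty.insert v 0)
      (by omega) hInv0]
    rfl
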